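-- pv_equiv track=rewrite | github.com/komaksym/biggitybiggityO | src/scraping/leetcode_solutions/solutions/maximal-range-that-each-element-is-maximum-in-it.py | maximumLengthOfRanges
-- ===== SOURCE A (Python) =====
-- def maximumLengthOfRanges(nums):
--
--     result = [0]*len(nums)
--     stk = [-1]
--     nums.append(float("inf"))
--     for i, x in enumerate(nums):
--         while stk[-1] != -1 and nums[stk[-1]] < x:
--             j = stk.pop()
--             result[j] = (i-1)-stk[-1]
--         stk.append(i)
--     return result
-- ===== SOURCE B (Python) =====
-- def maximumLengthOfRanges(nums):
--     # For each j: nearest k<j with nums[k] >= nums[j] (else -1) and nearest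
--     # i>j with nums[i] > nums[j] (else n); range length = right - left - 1.
--     # Unlike the original this does not mutate nums (return value is the same).
--     n = len(nums)
--     res = []
--     for j in range(n):
--         left = j - 1
--         while left >= 0 and nums[left] < nums[j]:
--             left -= 1
--         right = j + 1
--         while right < n and nums[right] <= nums[j]:
--             right += 1
--         res.append(right - left - 1)
--     return res
-- ===== Notes on version B (the rewrite author's own statement) =====
-- stated objective: simpler
-- what changed: Replaces the single monotonic-stack sweep (with its in-place append of float('inf') to nums) by two plain nearest-boundary scans per index (nearest left index with value >= nums[j], nearest right index with value > nums[j]) and returns right-left-1; B does not mutate nums.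
import Mathlib
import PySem

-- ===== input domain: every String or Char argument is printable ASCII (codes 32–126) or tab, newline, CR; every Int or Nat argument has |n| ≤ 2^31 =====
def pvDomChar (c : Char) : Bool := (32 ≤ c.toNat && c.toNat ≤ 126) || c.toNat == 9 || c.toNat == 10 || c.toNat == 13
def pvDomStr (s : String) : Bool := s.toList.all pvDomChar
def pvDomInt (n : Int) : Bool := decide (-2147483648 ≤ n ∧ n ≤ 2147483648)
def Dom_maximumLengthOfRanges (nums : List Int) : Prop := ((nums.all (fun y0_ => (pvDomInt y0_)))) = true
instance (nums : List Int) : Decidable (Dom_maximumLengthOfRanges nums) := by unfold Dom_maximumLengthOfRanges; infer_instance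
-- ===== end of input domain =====

-- B replaces A's single monotonic-stack sweep by two plain nearest-boundary scans per
-- index (simpler, no stack, no mutation); equivalence is about the RETURN value only:
-- A permanently appends float('inf') to the caller's list, B does not mutate nums.

-- ===== PORT A =====
-- 'x < y' where the values are the list's ints or the appended float('inf'),
-- modelled as Option Int with none = +inf (exact: inf compares greater than every int,
-- and inf < inf is False).
def pvLtO : Option Int → Option Int → Bool
  | some a, some b => decide (a < b)
  | some _, none => true
  | none, _ => false

-- the inner 'while stk[-1] != -1 and nums[stk[-1]] < x' loop; stk is the stack (top first);
-- the [] case is unreachable (the stack always carries the bottom sentinel -1).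
def pvPopLoop (ext : List (Option Int)) (i : Int) (x : Option Int) :
    List Int → List Int → List Int × List Int
  | result, [] => (result, [])
  | result, j :: rest =>
    if (j != -1) && pvLtO ((PySem.List.pyGet? ext j).getD none) x then
      -- result[j] = (i-1) - stk[-1]  (after the pop, stk[-1] is rest's head)
      pvPopLoop ext i x (result.set j.toNat (i - 1 - rest.headD (-1))) rest
    else (result, j :: rest)

-- 'for i, x in enumerate(nums)' over the extended list
def pvMainLoop (ext : List (Option Int)) :
    List (Int × Option Int) → List Int → List Int → List Int × List Int
  | [], result, stk => (result, stk)
  | (i, x) :: rest, result, stk =>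
    let p := pvPopLoop ext i x result stk
    pvMainLoop ext rest p.1 (i :: p.2)

def maximumLengthOfRanges (nums : List Int) : List Int :=
  let result := List.replicate nums.length 0
  let ext := nums.map some ++ [none]   -- nums.append(float("inf")): none models +inf
  (pvMainLoop ext (PySem.List.enumerate ext 0) result [-1]).1

-- ===== PORT B =====
-- 'left = j - 1; while left >= 0 and nums[left] < v: left -= 1'
-- (argument = left + 1, so 0 encodes left = -1)
def pvLeftScan (nums : List Int) (v : Int) : Nat → Int
  | 0 => -1
  | k + 1 => if nums.getD k 0 < v then pvLeftScan nums v k else (k : Int)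

-- 'right = j + 1; while right < n and nums[right] <= v: right += 1'
def pvRightScan (nums : List Int) (v : Int) (r : Nat) : Int :=
  if h : r < nums.length then
    if nums.getD r 0 ≤ v then pvRightScan nums v (r + 1) else (r : Int)
  else (r : Int)
termination_by nums.length - r

def maximumLengthOfRanges_alt (nums : List Int) : List Int :=
  (List.range nums.length).map (fun j =>
    let v := nums.getD j 0
    pvRightScan nums v (j + 1) - pvLeftScan nums v j - 1)

-- ===== PRECONDITION & SPEC =====
def Spec_maximumLengthOfRanges (nums : List Int) (out : List Int) : Prop := out = maximumLengthOfRanges_alt nums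
instance (nums : List Int) (out : List Int) : Decidable (Spec_maximumLengthOfRanges nums out) := by unfold Spec_maximumLengthOfRanges; infer_instance

-- ===== CLAIM (what is proved, stated in full; the proofs are below) =====
def Claim_equal_maximumLengthOfRanges : Prop := ∀ (nums : List Int), Dom_maximumLengthOfRanges nums → Spec_maximumLengthOfRanges nums (maximumLengthOfRanges nums)

-- ===== LEMMAS AND PROOFS =====

-- value at index m (indices handled are always in range)
def pvG (nums : List Int) (m : Nat) : Int := nums.getD m 0

-- j is a (non-strict) suffix maximum of nums[0:i]
def pvGood (nums : List Int) (j i : Nat) : Prop :=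
  ∀ m : Nat, j < m → m < i → pvG nums m ≤ pvG nums j

-- stk[-1] after a pop
def pvNext : List Nat → Int
  | [] => -1
  | k :: _ => (k : Int)

-- the effect of the pop loop on result
def pvUpd (i : Int) (p : Nat → Bool) : List Int → List Nat → List Int
  | r, [] => r
  | r, j :: rest =>
    if p j then pvUpd i p (r.set j (i - 1 - pvNext rest)) rest else r

def pvL (nums : List Int) (j : Nat) : Int := pvLeftScan nums (pvG nums j) j
def pvR (nums : List Int) (j : Nat) : Int := pvRightScan nums (pvG nums j) (j + 1)

-- loop invariant before processing index i: s is the stack (top first, without the -1)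
def pvInv (nums : List Int) (i : Nat) (r : List Int) (s : List Nat) : Prop :=
  r.length = nums.length ∧
  (∀ j : Nat, j < nums.length →
    r.getD j 0 = if pvR nums j < (i : Int) then pvR nums j - pvL nums j - 1 else 0) ∧
  s.Pairwise (· > ·) ∧ (∀ j ∈ s, j < i) ∧
  (∀ j : Nat, j < i → (j ∈ s ↔ pvGood nums j i))

-- ---- leftScan characterisation ----
lemma pvLeftScan_bounds (nums : List Int) (v : Int) (j : Nat) :
    -1 ≤ pvLeftScan nums v j ∧ pvLeftScan nums v j < (j : Int) := by
  induction j with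
  | zero => simp [pvLeftScan]
  | succ k ih =>
    simp only [pvLeftScan]
    split
    · exact ⟨ih.1, by push_cast; omega⟩
    · constructor <;> push_cast <;> omega

lemma pvLeftScan_between (nums : List Int) (v : Int) (j : Nat) :
    ∀ m : Nat, pvLeftScan nums v j < (m : Int) → m < j → pvG nums m < v := by
  induction j with
  | zero => intro m _ hm; omega
  | succ k ih =>
    intro m h1 h2
    simp only [pvLeftScan] at h1
    split at h1
    · rcases Nat.lt_succ_iff_lt_or_eq.mp h2 with h | h
      · exact ih m h1 h
      · subst h; assumption
    · omega
  -- note: in the else-branch h1 gives (k:Int) < m with m < k+1, impossible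

lemma pvLeftScan_hit (nums : List Int) (v : Int) (j : Nat) :
    ∀ m : Nat, pvLeftScan nums v j = (m : Int) → v ≤ pvG nums m := by
  induction j with
  | zero => intro m h; simp [pvLeftScan] at h
  | succ k ih =>
    intro m h
    simp only [pvLeftScan] at h
    split at h
    · exact ih m h
    · have : m = k := by omega
      subst this
      simp only [pvG]; omega

-- ---- rightScan characterisation ----
lemma pvRightScan_bounds (nums : List Int) (v : Int) (r : Nat) (hr : r ≤ nums.length) :
    (r : Int) ≤ pvRightScan nums v r ∧ pvRightScan nums v r ≤ (nums.length : Int) := by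
  fun_induction pvRightScan nums v r with
  | case1 r h1 h2 ih =>
    have := ih (by omega)
    push_cast at *; omega
  | case2 r h1 h2 => omega
  | case3 r h1 => omega

lemma pvRightScan_between (nums : List Int) (v : Int) (r : Nat) :
    ∀ m : Nat, r ≤ m → (m : Int) < pvRightScan nums v r → pvG nums m ≤ v := by
  fun_induction pvRightScan nums v r with
  | case1 r h1 h2 ih =>
    intro m hm1 hm2
    rcases Nat.eq_or_lt_of_le hm1 with h | h
    · subst h; exact h2
    · exact ih m h hm2
  | case2 r h1 h2 => intro m hm1 hm2; omega
  | case3 r h1 => intro m hm1 hm2; omega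

lemma pvRightScan_hit (nums : List Int) (v : Int) (r : Nat) :
    ∀ m : Nat, (m : Int) = pvRightScan nums v r → m < nums.length → v < pvG nums m := by
  fun_induction pvRightScan nums v r with
  | case1 r h1 h2 ih => exact ih
  | case2 r h1 h2 =>
    intro m hm _
    have : m = r := by omega
    subst this; simp only [pvG]; omega
  | case3 r h1 =>
    intro m hm hmn; omega

lemma pvRightScan_eq (nums : List Int) (v : Int) (r : Nat) (t : Int)
    (h1 : (r : Int) ≤ t) (h2 : t ≤ (nums.length : Int))
    (h3 : ∀ m : Nat, (m : Int) = t → m < nums.length → v < pvG nums m)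
    (h4 : ∀ m : Nat, r ≤ m → (m : Int) < t → pvG nums m ≤ v) :
    pvRightScan nums v r = t := by
  have hr : r ≤ nums.length := by omega
  rcases lt_trichotomy (pvRightScan nums v r) t with h | h | h
  · exfalso
    set q := pvRightScan nums v r with hq
    have hb := pvRightScan_bounds nums v r hr
    have hcast : ((q.toNat : Nat) : Int) = q := by omega
    have hx := h4 q.toNat (by omega) (by omega)
    have hy := pvRightScan_hit nums v r q.toNat hcast (by omega)
    omega
  · exact h
  · exfalso
    have hb := pvRightScan_bounds nums v r hr
    have ht0 : 0 ≤ t := by omega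
    have hcast : ((t.toNat : Nat) : Int) = t := by omega
    have hx := pvRightScan_between nums v r t.toNat (by omega) (by omega)
    have hy := h3 t.toNat hcast (by omega)
    omega

lemma pvR_eq (nums : List Int) (j i : Nat) (hj : j < i) (hi : i ≤ nums.length)
    (hgood : pvGood nums j i)
    (hc : i = nums.length ∨ (i < nums.length ∧ pvG nums j < pvG nums i)) :
    pvR nums j = (i : Int) := by
  apply pvRightScan_eq <;> try (push_cast; omega)
  · intro m hm hmn
    have : m = i := by omega
    subst this
    rcases hc with h | h
    · omega
    · exact h.2
  · intro m hm1 hm2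
    exact hgood m (by omega) (by omega)

-- ---- the pop loop, structurally ----
lemma pvPopLoop_eq (ext : List (Option Int)) (i : Int) (x : Option Int) (p : Nat → Bool) :
    ∀ (s : List Nat) (r : List Int), (∀ j ∈ s, j < ext.length) →
    (∀ j ∈ s, p j = pvLtO (ext.getD j none) x) →
    pvPopLoop ext i x r (s.map Int.ofNat ++ [-1]) =
      (pvUpd i p r s, (s.dropWhile p).map Int.ofNat ++ [-1]) := by
  intro s
  induction s with
  | nil =>
    intro r _ _
    simp [pvPopLoop, pvUpd, List.dropWhile]
  | cons j rest ih =>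
    intro r hb hp
    have hj : j < ext.length := hb j (by simp)
    have hget : (PySem.List.pyGet? ext (Int.ofNat j)).getD none = ext.getD j none := by
      simp [PySem.List.pyGet?_natCast, List.getD]
    have hne : ((Int.ofNat j) != -1) = true := by simp
    simp only [List.map_cons, List.cons_append, pvPopLoop, hget, hne, Bool.true_and,
      List.dropWhile_cons, pvUpd]
    rw [← hp j (by simp)]
    by_cases hpj : p j
    · simp only [hpj, if_true]
      have hhead : (rest.map Int.ofNat ++ [-1]).headD (-1) = pvNext rest := by
        cases rest <;> simp [pvNext]
      have htoNat : (Int.ofNat j).toNat = j := rfl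
      rw [hhead, htoNat]
      exact ih _ (fun k hk => hb k (by simp [hk])) (fun k hk => hp k (by simp [hk]))
    · simp [hpj]

lemma pv_dropWhile_mem (p : Nat → Bool) :
    ∀ (s : List Nat), s.Pairwise (· > ·) →
    (∀ a ∈ s, ∀ b ∈ s, b < a → p a = false → p b = false) →
    ∀ j, (j ∈ s.dropWhile p ↔ j ∈ s ∧ p j = false) := by
  intro s
  induction s with
  | nil => intro _ _ j; simp
  | cons h rest ih =>
    intro hpair hmono j
    rw [List.dropWhile_cons]
    by_cases hph : p h
    · simp only [hph, if_true]
      rw [ih (hpair.sublist (List.sublist_cons_self h rest))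
        (fun a ha b hb => hmono a (by simp [ha]) b (by simp [hb]))]
      constructor
      · rintro ⟨h1, h2⟩; exact ⟨by simp [h1], h2⟩
      · rintro ⟨h1, h2⟩
        rcases List.mem_cons.mp h1 with rfl | h1
        · rw [hph] at h2; cases h2
        · exact ⟨h1, h2⟩
    · simp only [Bool.not_eq_true] at hph
      simp only [hph]   -- hmm may need Bool handling
      constructor
      · intro hj
        refine ⟨hj, ?_⟩
        rcases List.mem_cons.mp hj with rfl | hj'
        · exact hph
        · have hlt : j < h := List.rel_of_pairwise_cons hpair hj'
          exact hmono h (by simp) j (by simp [hj']) hlt hph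
      · exact fun hh => hh.1

-- ---- result update characterisation ----
lemma pvUpd_length (i : Int) (p : Nat → Bool) :
    ∀ (s : List Nat) (r : List Int), (pvUpd i p r s).length = r.length := by
  intro s
  induction s with
  | nil => intro r; simp [pvUpd]
  | cons j rest ih =>
    intro r
    simp only [pvUpd]
    split
    · rw [ih]; simp
    · rfl

lemma pvUpd_getD (nums : List Int) (i : Int) (p : Nat → Bool) (s₀ : List Nat)
    (hpair : s₀.Pairwise (· > ·))
    (hmono : ∀ a ∈ s₀, ∀ b ∈ s₀, b < a → p a = false → p b = false)
    (hlen : ∀ j ∈ s₀, j < nums.length)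
    (hadj : ∀ pre j rest, s₀ = pre ++ j :: rest → pvNext rest = pvL nums j) :
    ∀ (s pre : List Nat) (r : List Int), s₀ = pre ++ s → r.length = nums.length →
    ∀ jq : Nat, jq < nums.length →
    (pvUpd i p r s).getD jq 0 =
      if jq ∈ s ∧ p jq = true then i - 1 - pvL nums jq else r.getD jq 0 := by
  intro s
  induction s with
  | nil => intro pre r _ _ jq _; simp [pvUpd]
  | cons j rest ih =>
    intro pre r hdec hrlen jq hjq
    have hjs : j ∈ s₀ := by rw [hdec]; simp
    have hjn : j < nums.length := hlen j hjs
    have hjrest : j ∉ rest := by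
      have : (j :: rest).Pairwise (· > ·) := (hdec ▸ hpair).sublist (List.sublist_append_right pre _)
      intro hmem
      exact absurd (List.rel_of_pairwise_cons this hmem) (lt_irrefl j)
    simp only [pvUpd]
    by_cases hpj : p j
    · simp only [hpj, if_true]
      have hnext : pvNext rest = pvL nums j := hadj pre j rest hdec
      rw [ih (pre ++ [j]) _ (by simp [hdec]) (by simp [hrlen]) jq hjq]
      by_cases hc : jq ∈ rest ∧ p jq = true
      · simp [hc]
      · simp only [if_neg hc]
        by_cases hje : jq = j
        · subst hje
          rw [List.getD_eq_getElem?_getD, List.getElem?_set_self (by omega)]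
          simp [hpj, hnext]
        · rw [List.getD_eq_getElem?_getD, List.getElem?_set_ne (by omega),
            ← List.getD_eq_getElem?_getD]
          have hcond : ¬ (jq ∈ j :: rest ∧ p jq = true) := by
            rintro ⟨hm, hp2⟩
            rcases List.mem_cons.mp hm with hm' | hm'
            · exact hje hm'
            · exact hc ⟨hm', hp2⟩
          rw [if_neg hcond]
    · have hpjf : p j = false := by revert hpj; cases p j <;> simp
      rw [if_neg hpj]
      have hcond : ¬ (jq ∈ j :: rest ∧ p jq = true) := by
        rintro ⟨hm, hp2⟩
        rcases List.mem_cons.mp hm with hm' | hm'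
        · subst hm'; exact hpj hp2
        · have hjq0 : jq ∈ s₀ := by rw [hdec]; simp [hm']
          have hpw : (j :: rest).Pairwise (· > ·) :=
            (hdec ▸ hpair).sublist (List.sublist_append_right pre _)
          have hlt : jq < j := List.rel_of_pairwise_cons hpw hm'
          have := hmono j hjs jq hjq0 hlt hpjf
          rw [this] at hp2; cases hp2
      rw [if_neg hcond]

-- ---- the element below a stack entry is its left boundary ----
lemma pvL_bounds (nums : List Int) (j : Nat) : -1 ≤ pvL nums j ∧ pvL nums j < (j : Int) :=
  pvLeftScan_bounds nums (pvG nums j) j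

lemma pvL_between (nums : List Int) (j : Nat) :
    ∀ m : Nat, pvL nums j < (m : Int) → m < j → pvG nums m < pvG nums j :=
  pvLeftScan_between nums (pvG nums j) j

lemma pvL_hit (nums : List Int) (j : Nat) :
    ∀ m : Nat, pvL nums j = (m : Int) → pvG nums j ≤ pvG nums m :=
  pvLeftScan_hit nums (pvG nums j) j

lemma pvL_mem (nums : List Int) (i : Nat) (s₀ : List Nat)
    (hbd : ∀ j ∈ s₀, j < i)
    (hmemf : ∀ j ∈ s₀, pvGood nums j i)
    (hmemb : ∀ k : Nat, k < i → pvGood nums k i → k ∈ s₀)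
    (j0 : Nat) (hj0 : j0 ∈ s₀) (hl : 0 ≤ pvL nums j0) :
    (pvL nums j0).toNat ∈ s₀ ∧ (pvL nums j0).toNat < j0 := by
  set l := pvL nums j0 with hldef
  have hb := pvL_bounds nums j0
  rw [← hldef] at hb
  have hcast : ((l.toNat : Nat) : Int) = l := by omega
  have hmlt : l.toNat < j0 := by omega
  have hhit : pvG nums j0 ≤ pvG nums l.toNat :=
    pvL_hit nums j0 l.toNat hcast.symm
  have hji : j0 < i := hbd j0 hj0
  have hgoodj := hmemf j0 hj0
  refine ⟨hmemb l.toNat (by omega) ?_, hmlt⟩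
  intro m' h1 h2
  rcases lt_trichotomy m' j0 with h | h | h
  · have := pvL_between nums j0 m' (by omega) h
    omega
  · subst h; exact hhit
  · exact le_trans (hgoodj m' h h2) hhit

lemma pvAdj (nums : List Int) (i : Nat) (s₀ : List Nat)
    (hpair : s₀.Pairwise (· > ·))
    (hbd : ∀ j ∈ s₀, j < i)
    (hmemf : ∀ j ∈ s₀, pvGood nums j i)
    (hmemb : ∀ k : Nat, k < i → pvGood nums k i → k ∈ s₀) :
    ∀ pre j rest, s₀ = pre ++ j :: rest → pvNext rest = pvL nums j := by
  intro pre j rest hdec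
  have hjs : j ∈ s₀ := by rw [hdec]; simp
  have hpw : (j :: rest).Pairwise (· > ·) :=
    (hdec ▸ hpair).sublist (List.sublist_append_right pre _)
  have hpre : ∀ a ∈ pre, j < a := by
    intro a ha
    have := (List.pairwise_append.mp (hdec ▸ hpair)).2.2 a ha j (by simp)
    exact this
  have hbnd := pvL_bounds nums j
  cases rest with
  | nil =>
    show (-1 : Int) = pvL nums j
    by_contra hne
    have hl : 0 ≤ pvL nums j := by
      rcases lt_or_ge (pvL nums j) 0 with h | h
      · exfalso; exact hne (by omega)
      · exact h
    obtain ⟨hmem, hlt⟩ := pvL_mem nums i s₀ hbd hmemf hmemb j hjs hl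
    rw [hdec] at hmem
    rcases List.mem_append.mp hmem with h | h
    · exact absurd (hpre _ h) (by omega)
    · rcases List.mem_cons.mp h with h | h
      · omega
      · cases h
  | cons k0 rest' =>
    show ((k0 : Nat) : Int) = pvL nums j
    have hk0s : k0 ∈ s₀ := by rw [hdec]; simp
    have hk0j : k0 < j := List.rel_of_pairwise_cons hpw (by simp)
    have hji : j < i := hbd j hjs
    have hjk0 : pvG nums j ≤ pvG nums k0 := hmemf k0 hk0s j hk0j hji
    have hlk0 : (k0 : Int) ≤ pvL nums j := by
      by_contra hcon
      have := pvL_between nums j k0 (by omega) hk0j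
      omega
    have hl : 0 ≤ pvL nums j := by omega
    obtain ⟨hmem, hlt⟩ := pvL_mem nums i s₀ hbd hmemf hmemb j hjs hl
    rw [hdec] at hmem
    rcases List.mem_append.mp hmem with h | h
    · exact absurd (hpre _ h) (by omega)
    · rcases List.mem_cons.mp h with h | h
      · omega
      · rcases List.mem_cons.mp h with h | h
        · omega
        · have : k0 > (pvL nums j).toNat :=
            List.rel_of_pairwise_cons (hpw.sublist (List.sublist_cons_self j _)) h
          omega

-- ---- monotonicity of the pop condition along the stack ----
lemma pvMono (nums : List Int) (i : Nat) (x : Option Int) (s₀ : List Nat)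
    (hbd : ∀ j ∈ s₀, j < i)
    (hmemf : ∀ j ∈ s₀, pvGood nums j i) :
    ∀ a ∈ s₀, ∀ b ∈ s₀, b < a →
      (fun j => pvLtO (some (pvG nums j)) x) a = false →
      (fun j => pvLtO (some (pvG nums j)) x) b = false := by
  intro a ha b hb hba hfa
  cases x with
  | none => simp [pvLtO] at hfa
  | some xv =>
    simp only [pvLtO, decide_eq_false_iff_not, not_lt] at hfa ⊢
    have : pvG nums a ≤ pvG nums b := hmemf b hb a hba (hbd a ha)
    omega

-- ---- one loop iteration i < n preserves the invariant ----
lemma pvStep (nums : List Int) (i : Nat) (hi : i < nums.length)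
    (r : List Int) (s : List Nat) (hinv : pvInv nums i r s) :
    pvInv nums (i + 1)
      (pvUpd (i : Int) (fun j => pvLtO (some (pvG nums j)) (some (pvG nums i))) r s)
      (i :: s.dropWhile (fun j => pvLtO (some (pvG nums j)) (some (pvG nums i)))) := by
  obtain ⟨hrlen, hres, hpair, hbd, hmem⟩ := hinv
  set p : Nat → Bool := fun j => pvLtO (some (pvG nums j)) (some (pvG nums i)) with hp
  have hmemf : ∀ j ∈ s, pvGood nums j i := fun j hj => (hmem j (hbd j hj)).mp hj
  have hmemb : ∀ k : Nat, k < i → pvGood nums k i → k ∈ s := fun k hk hg => (hmem k hk).mpr hg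
  have hmono := pvMono nums i (some (pvG nums i)) s hbd hmemf
  have hadj := pvAdj nums i s hpair hbd hmemf hmemb
  have hupd := pvUpd_getD nums (i : Int) p s hpair hmono
    (fun j hj => by have := hbd j hj; omega) hadj s [] r rfl hrlen
  have hpchar : ∀ j : Nat, p j = true ↔ pvG nums j < pvG nums i := by
    intro j; simp [hp, pvLtO]
  have hRgt : ∀ j : Nat, j < nums.length → (j : Int) < pvR nums j := by
    intro j hj
    have := pvRightScan_bounds nums (pvG nums j) (j + 1) (by omega)
    have h2 := this.1
    unfold pvR
    push_cast at h2 ⊢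
    omega
  refine ⟨?_, ?_, ?_, ?_, ?_⟩
  · rw [pvUpd_length]; exact hrlen
  · intro j hj
    rw [hupd j hj]
    by_cases hc : j ∈ s ∧ p j = true
    · have hji : j < i := hbd j hc.1
      have hRj : pvR nums j = (i : Int) :=
        pvR_eq nums j i hji (by omega) (hmemf j hc.1)
          (Or.inr ⟨hi, (hpchar j).mp hc.2⟩)
      rw [if_pos hc, hRj, if_pos (by push_cast; omega)]
      ring
    · rw [if_neg hc]
      have hRne : pvR nums j ≠ (i : Int) := by
        intro hR
        apply hc
        have hji : j < i := by have := hRgt j hj; omega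
        have hR2 : pvRightScan nums (pvG nums j) (j + 1) = (i : Int) := hR
        have hgood : pvGood nums j i := by
          intro m h1 h2
          exact pvRightScan_between nums (pvG nums j) (j + 1) m (by omega) (by omega)
        have hval : pvG nums j < pvG nums i :=
          pvRightScan_hit nums (pvG nums j) (j + 1) i hR.symm hi
        exact ⟨hmemb j hji hgood, (hpchar j).mpr hval⟩
      rw [hres j hj]
      by_cases hlt : pvR nums j < (i : Int)
      · rw [if_pos hlt, if_pos (by push_cast; omega)]
      · rw [if_neg hlt, if_neg (by push_cast; omega)]
  · refine List.pairwise_cons.mpr ⟨?_, hpair.sublist (List.dropWhile_sublist p)⟩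
    intro a ha
    exact hbd a ((List.dropWhile_sublist p).mem ha)
  · intro j hj
    rcases List.mem_cons.mp hj with h | h
    · omega
    · have := hbd j ((List.dropWhile_sublist p).mem h)
      omega
  · intro j hji1
    have hdw := pv_dropWhile_mem p s hpair hmono j
    by_cases hje : j = i
    · subst hje
      constructor
      · intro _ m h1 h2; omega
      · intro _; simp
    · have hji : j < i := by omega
      rw [List.mem_cons]
      constructor
      · rintro (h | h)
        · exact absurd h hje
        · obtain ⟨hjs, hpf⟩ := hdw.mp h
          have hg := (hmem j hji).mp hjs
          intro m h1 h2
          rcases Nat.lt_succ_iff_lt_or_eq.mp h2 with h3 | h3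
          · exact hg m h1 h3
          · subst h3
            have : ¬ (pvG nums j < pvG nums m) := by
              rw [← hpchar j, hpf]; simp
            omega
      · intro hg
        right
        rw [hdw]
        refine ⟨(hmem j hji).mpr (fun m h1 h2 => hg m h1 (by omega)), ?_⟩
        have : pvG nums i ≤ pvG nums j := hg i hji (by omega)
        rw [← Bool.not_eq_true, hpchar j]
        omega

-- ---- the sentinel iteration i = n fills in the remaining entries ----
lemma pvFinal (nums : List Int) (r : List Int) (s : List Nat)
    (hinv : pvInv nums nums.length r s) :
    (pvUpd (nums.length : Int) (fun j => pvLtO (some (pvG nums j)) none) r s).length = nums.length ∧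
    ∀ j : Nat, j < nums.length →
      (pvUpd (nums.length : Int) (fun j => pvLtO (some (pvG nums j)) none) r s).getD j 0 =
        pvR nums j - pvL nums j - 1 := by
  obtain ⟨hrlen, hres, hpair, hbd, hmem⟩ := hinv
  set n := nums.length with hn
  set p : Nat → Bool := fun j => pvLtO (some (pvG nums j)) none with hp
  have hmemf : ∀ j ∈ s, pvGood nums j n := fun j hj => (hmem j (hbd j hj)).mp hj
  have hmemb : ∀ k : Nat, k < n → pvGood nums k n → k ∈ s := fun k hk hg => (hmem k hk).mpr hg
  have hmono := pvMono nums n none s hbd hmemf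
  have hadj := pvAdj nums n s hpair hbd hmemf hmemb
  have hupd := pvUpd_getD nums (n : Int) p s hpair hmono hbd hadj s [] r rfl hrlen
  have hptrue : ∀ j : Nat, p j = true := fun j => rfl
  refine ⟨by rw [pvUpd_length]; exact hrlen, ?_⟩
  intro j hj
  rw [hupd j hj]
  have hRb := pvRightScan_bounds nums (pvG nums j) (j + 1) (by omega)
  by_cases hjs : j ∈ s
  · have hRj : pvR nums j = (n : Int) :=
      pvR_eq nums j n (hbd j hjs) (by omega) (hmemf j hjs) (Or.inl rfl)
    rw [if_pos ⟨hjs, hptrue j⟩, hRj]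
    ring
  · have hcond : ¬ (j ∈ s ∧ p j = true) := fun h => hjs h.1
    rw [if_neg hcond, hres j hj]
    have hRlt : pvR nums j < (n : Int) := by
      rcases lt_or_ge (pvR nums j) (n : Int) with h | h
      · exact h
      · exfalso
        apply hjs
        apply hmemb j hj
        intro m h1 h2
        apply pvRightScan_between nums (pvG nums j) (j + 1) m (by omega)
        have h2 : (n : Int) ≤ pvRightScan nums (pvG nums j) (j + 1) := h
        omega
    rw [if_pos hRlt]

-- ---- the extended list ----
lemma pvExt_getD (nums : List Int) (j : Nat) (hj : j < nums.length) :
    (nums.map some ++ [none] : List (Option Int)).getD j none = some (pvG nums j) := by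
  rw [List.getD_eq_getElem?_getD, List.getElem?_append_left (by simp [hj]),
    List.getElem?_map]
  rw [List.getElem?_eq_getElem hj]
  simp [pvG, List.getD_eq_getElem?_getD, List.getElem?_eq_getElem hj]

lemma pvExt_len (nums : List Int) :
    (nums.map some ++ [none] : List (Option Int)).length = nums.length + 1 := by simp

-- ---- running the main loop from an invariant state ----
lemma pvRun (nums : List Int) : ∀ (k i : Nat) (r : List Int) (s : List Nat),
    i + k = nums.length → pvInv nums i r s →
    ((pvMainLoop (nums.map some ++ [none])
        (PySem.List.enumerate ((nums.map some ++ [none]).drop i) (i : Int))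
        r (s.map Int.ofNat ++ [-1])).1.length = nums.length ∧
      ∀ j : Nat, j < nums.length →
        (pvMainLoop (nums.map some ++ [none])
          (PySem.List.enumerate ((nums.map some ++ [none]).drop i) (i : Int))
          r (s.map Int.ofNat ++ [-1])).1.getD j 0 = pvR nums j - pvL nums j - 1) := by
  intro k
  induction k with
  | zero =>
    intro i r s hik hinv
    have hi : i = nums.length := by omega
    subst hi
    set ext : List (Option Int) := nums.map some ++ [none] with hext
    have hdrop : ext.drop nums.length = [none] := by
      rw [hext]
      rw [List.drop_append_of_le_length (by simp)]
      simp
    rw [hdrop, PySem.List.enumerate_cons, PySem.List.enumerate_nil]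
    simp only [pvMainLoop]
    rw [pvPopLoop_eq ext (nums.length : Int) none
        (fun j => pvLtO (some (pvG nums j)) none) s r
        (fun j hj => by
          have := hinv.2.2.2.1 j hj
          rw [hext, pvExt_len]; omega)
        (fun j hj => by
          have hjn := hinv.2.2.2.1 j hj
          rw [hext, pvExt_getD nums j hjn])]
    simpa using pvFinal nums r s hinv
  | succ k ih =>
    intro i r s hik hinv
    have hi : i < nums.length := by omega
    set ext : List (Option Int) := nums.map some ++ [none] with hext
    have hgetI : ext.getD i none = some (pvG nums i) := hext ▸ pvExt_getD nums i hi
    have hlen : i < ext.length := by rw [hext, pvExt_len]; omega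
    have hdrop : ext.drop i = some (pvG nums i) :: ext.drop (i + 1) := by
      rw [List.drop_eq_getElem_cons hlen]
      congr 1
      rw [← hgetI, List.getD_eq_getElem?_getD, List.getElem?_eq_getElem hlen]
      rfl
    rw [hdrop, PySem.List.enumerate_cons]
    simp only [pvMainLoop]
    rw [pvPopLoop_eq ext (i : Int) (some (pvG nums i))
        (fun j => pvLtO (some (pvG nums j)) (some (pvG nums i))) s r
        (fun j hj => by
          have := hinv.2.2.2.1 j hj
          rw [hext, pvExt_len]; omega)
        (fun j hj => by
          have hjn : j < nums.length := by have := hinv.2.2.2.1 j hj; omega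
          rw [hext, pvExt_getD nums j hjn])]
    have hstep := pvStep nums i hi r s hinv
    have hcast : ((i : Int) + 1) = (((i + 1 : Nat)) : Int) := by push_cast; ring
    have hpush : ((i : Int) ::
        ((s.dropWhile (fun j => pvLtO (some (pvG nums j)) (some (pvG nums i)))).map Int.ofNat
          ++ [-1])) =
        ((i :: s.dropWhile (fun j => pvLtO (some (pvG nums j)) (some (pvG nums i)))).map
          Int.ofNat ++ [-1]) := by
      simp
    rw [hcast, hpush]
    exact ih (i + 1) _ _ (by omega) hstep

lemma pvInit (nums : List Int) :
    pvInv nums 0 (List.replicate nums.length 0) [] := by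
  refine ⟨by simp, ?_, by simp, by simp, by simp⟩
  intro j hj
  have hb := pvRightScan_bounds nums (pvG nums j) (j + 1) (by omega)
  have hR : pvR nums j = pvRightScan nums (pvG nums j) (j + 1) := rfl
  rw [if_neg (by push_cast at hb; omega)]
  rw [List.getD_eq_getElem?_getD, List.getElem?_replicate]
  simp [hj]

lemma pvMain_eq (nums : List Int) :
    maximumLengthOfRanges nums = maximumLengthOfRanges_alt nums := by
  have hrun := pvRun nums nums.length 0 (List.replicate nums.length 0) []
    (by omega) (pvInit nums)
  have h0 : ((nums.map some ++ [none] : List (Option Int)).drop 0) = nums.map some ++ [none] := rfl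
  rw [h0] at hrun
  obtain ⟨hlen, hval⟩ := hrun
  apply List.ext_getElem
  · simpa [maximumLengthOfRanges, maximumLengthOfRanges_alt] using hlen
  · intro j h1 h2
    have hj : j < nums.length := by simpa [maximumLengthOfRanges_alt] using h2
    have hv := hval j hj
    have hA : (maximumLengthOfRanges nums).getD j 0 = pvR nums j - pvL nums j - 1 := by
      simpa [maximumLengthOfRanges] using hv
    rw [List.getD_eq_getElem?_getD, List.getElem?_eq_getElem h1] at hA
    simp only [Option.getD_some] at hA
    rw [hA]
    simp only [maximumLengthOfRanges_alt]
    rw [List.getElem_map, List.getElem_range]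
    rfl

-- ===== VERDICT (by name: the statement is the Claim_ definition above) =====
theorem maximumLengthOfRanges_spec : Claim_equal_maximumLengthOfRanges := by
  intro nums _
  show maximumLengthOfRanges nums = maximumLengthOfRanges_alt nums
  exact pvMain_eq nums
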